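-- pv_equiv track=rewrite | github.com/bely12/borrelia-methylomics | Motif_Discovery/motif_discovery_GA.py | motif_matches_masking
-- ===== SOURCE A (Python) =====
-- def motif_matches_masking(motif, mod_pos, seq): # used in motif masking
--
--     degenerate_bases = {
--     "A": {"A"},
--     "C": {"C"},
--     "G": {"G"},
--     "T": {"T"},
--     "R": {"A", "G"},
--     "Y": {"C", "T"},
--     "S": {"G", "C"},
--     "W": {"A", "T"},
--     "K": {"G", "T"},
--     "M": {"A", "C"},
--     "B": {"C", "G", "T"},
--     "D": {"A", "G", "T"},
--     "H": {"A", "C", "T"},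
--     "V": {"A", "C", "G"},
--     "N": {"A", "C", "G", "T"}}
--
--     k = len(motif)
--     center_index = len(seq) // 2
--     start = center_index - mod_pos
--     end = start + k
--     if start < 0 or end > len(seq):
--         return False
--     window = seq[start:end]
--     for m, b in zip(motif, window):
--         if b not in degenerate_bases[m]:
--             return False
--     return True
-- ===== SOURCE B (Python) =====
-- import re
--
-- def motif_matches_masking(motif, mod_pos, seq): # used in motif masking
--     # Regex re-implementation: compile the degenerate motif into one regex
--     # pattern (a literal base or a [..] character class per code) and let
--     # re.fullmatch decide the window, instead of a per-position set-lookup loop.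
--     CODES = {"A": "A", "C": "C", "G": "G", "T": "T",
--              "R": "AG", "Y": "CT", "S": "GC", "W": "AT", "K": "GT", "M": "AC",
--              "B": "CGT", "D": "AGT", "H": "ACT", "V": "ACG", "N": "ACGT"}
--     k = len(motif)
--     start = len(seq) // 2 - mod_pos
--     end = start + k
--     if start < 0 or end > len(seq):
--         return False
--     pattern = "".join(c if len(c) == 1 else "[" + c + "]"
--                       for c in (CODES[m] for m in motif))
--     return re.fullmatch(pattern, seq[start:end]) is not None
-- ===== Notes on version B (the rewrite author's own statement) =====
-- stated objective: idiomatic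
-- what changed: Replaces the per-position loop with set-membership tests by a compile-then-match design: the degenerate motif is first translated into one regex pattern (a literal base or a [..] character class per code) and the centered window is then decided by re.fullmatch's compiled automaton.
-- outside the precondition, e.g. on motif_matches_masking('AZ', 0, 'CCCC'): A returns False, B raises KeyError
import Mathlib
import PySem

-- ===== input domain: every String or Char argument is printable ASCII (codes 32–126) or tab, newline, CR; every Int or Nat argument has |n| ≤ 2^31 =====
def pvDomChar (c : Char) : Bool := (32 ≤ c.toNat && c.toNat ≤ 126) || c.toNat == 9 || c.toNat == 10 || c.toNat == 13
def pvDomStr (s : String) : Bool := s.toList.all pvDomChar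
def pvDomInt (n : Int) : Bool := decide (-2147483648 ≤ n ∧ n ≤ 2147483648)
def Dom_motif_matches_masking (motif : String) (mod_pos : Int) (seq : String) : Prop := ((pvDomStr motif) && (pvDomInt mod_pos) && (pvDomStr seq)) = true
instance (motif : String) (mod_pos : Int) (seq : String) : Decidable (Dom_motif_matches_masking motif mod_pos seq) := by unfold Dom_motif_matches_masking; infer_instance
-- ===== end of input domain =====

-- B compiles the degenerate motif into one regex pattern (literal base or [..]
-- class per code) and decides the window with a fullmatch of that pattern,
-- instead of A's per-position loop over base sets (objective: idiomatic).

-- ===== PORT A =====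
-- degenerate_bases[m]: none = key absent (Python KeyError; such inputs are outside Pre_)
def pvDegBases (c : Char) : Option (List Char) :=
  match c with
  | 'A' => some ['A'] | 'C' => some ['C'] | 'G' => some ['G'] | 'T' => some ['T']
  | 'R' => some ['A', 'G'] | 'Y' => some ['C', 'T'] | 'S' => some ['G', 'C']
  | 'W' => some ['A', 'T'] | 'K' => some ['G', 'T'] | 'M' => some ['A', 'C']
  | 'B' => some ['C', 'G', 'T'] | 'D' => some ['A', 'G', 'T'] | 'H' => some ['A', 'C', 'T']
  | 'V' => some ['A', 'C', 'G'] | 'N' => some ['A', 'C', 'G', 'T']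
  | _ => none

-- the 'for m, b in zip(motif, window)' loop of A
def pvLoopA : List (Char × Char) → Bool
  | [] => true
  | (m, b) :: rest =>
    match pvDegBases m with
    | none => false            -- Python raises KeyError here; excluded by Pre_
    | some s => if b ∈ s then pvLoopA rest else false

def motif_matches_masking (motif : String) (mod_pos : Int) (seq : String) : Bool :=
  let k : Int := PySem.Str.len motif
  let center_index : Int := PySem.Int.floordiv (PySem.Str.len seq) 2
  let start : Int := center_index - mod_pos
  let e : Int := start + k
  if start < 0 ∨ e > PySem.Str.len seq then false
  else
    let window : List Char := PySem.List.slice seq.toList (some start) (some e)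
    pvLoopA (motif.toList.zip window)

-- ===== PORT B =====
-- CODES[m]: none = key absent (Python KeyError; such inputs are outside Pre_)
def pvCode (c : Char) : Option String :=
  match c with
  | 'A' => some "A" | 'C' => some "C" | 'G' => some "G" | 'T' => some "T"
  | 'R' => some "AG" | 'Y' => some "CT" | 'S' => some "GC"
  | 'W' => some "AT" | 'K' => some "GT" | 'M' => some "AC"
  | 'B' => some "CGT" | 'D' => some "AGT" | 'H' => some "ACT"
  | 'V' => some "ACG" | 'N' => some "ACGT"
  | _ => none

-- pattern = "".join(c if len(c) == 1 else "[" + c + "]" for c in (CODES[m] for m in motif))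
def pvCompile : List Char → Option String
  | [] => some ""
  | m :: ms =>
    match pvCode m with
    | none => none             -- Python raises KeyError here; excluded by Pre_
    | some c =>
      match pvCompile ms with
      | none => none
      | some rest => some ((if c.length == 1 then c else "[" ++ c ++ "]") ++ rest)

-- hand port of re.fullmatch restricted to the pattern grammar pvCompile emits
-- (literal characters and plain [..] classes); exact on exactly those patterns
def pvFullmatch : List Char → List Char → Bool
  | [], [] => true
  | [], _ :: _ => false
  | p :: ps, text =>
    if p = '[' then
      let cls := ps.takeWhile (fun c => c != ']')
      let rest := (ps.dropWhile (fun c => c != ']')).drop 1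
      match text with
      | [] => false
      | t :: ts => decide (t ∈ cls) && pvFullmatch rest ts
    else
      match text with
      | [] => false
      | t :: ts => (p == t) && pvFullmatch ps ts
termination_by pat _ => pat.length
decreasing_by
  · have h1 := List.length_dropWhile_le (fun c => c != ']') ps
    simp only [List.length_drop, List.length_cons]
    omega
  · simp

def motif_matches_masking_alt (motif : String) (mod_pos : Int) (seq : String) : Bool :=
  let k : Int := PySem.Str.len motif
  let start : Int := PySem.Int.floordiv (PySem.Str.len seq) 2 - mod_pos
  let e : Int := start + k
  if start < 0 ∨ e > PySem.Str.len seq then false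
  else
    match pvCompile motif.toList with
    | none => false            -- Python raises KeyError here; excluded by Pre_
    | some pat =>
      pvFullmatch pat.toList (PySem.List.slice seq.toList (some start) (some e))

-- ===== PRECONDITION & SPEC =====
-- membership in the shared key set of degenerate_bases/CODES, written without touching either port
def pvIsIUPAC (c : Char) : Bool :=
  c ∈ ['A', 'C', 'G', 'T', 'R', 'Y', 'S', 'W', 'K', 'M', 'B', 'D', 'H', 'V', 'N']

-- Pre_ excludes inputs whose motif contains a non-IUPAC character while the window fits:
-- there both programs raise KeyError, except when an earlier position already mismatches,
-- in which case A returns False while B still raises in compilation (see the cite).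
def Pre_motif_matches_masking (motif : String) (mod_pos : Int) (seq : String) : Prop :=
  (PySem.Int.floordiv (PySem.Str.len seq) 2 - mod_pos < 0 ∨
   PySem.Int.floordiv (PySem.Str.len seq) 2 - mod_pos + PySem.Str.len motif > PySem.Str.len seq) ∨
  motif.toList.all pvIsIUPAC = true

instance (motif : String) (mod_pos : Int) (seq : String) : Decidable (Pre_motif_matches_masking motif mod_pos seq) := by
  unfold Pre_motif_matches_masking; infer_instance

def pvWitness_motif_matches_masking : String × Int × String := ("GATC", 2, "AAGATCAA")

def Spec_motif_matches_masking (motif : String) (mod_pos : Int) (seq : String) (out : Bool) : Prop := out = motif_matches_masking_alt motif mod_pos seq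
instance (motif : String) (mod_pos : Int) (seq : String) (out : Bool) : Decidable (Spec_motif_matches_masking motif mod_pos seq out) := by unfold Spec_motif_matches_masking; infer_instance

-- ===== CLAIM (what is proved, stated in full; the proofs are below) =====
def Claim_equal_motif_matches_masking : Prop := ∀ (motif : String) (mod_pos : Int) (seq : String), Dom_motif_matches_masking motif mod_pos seq → Pre_motif_matches_masking motif mod_pos seq → Spec_motif_matches_masking motif mod_pos seq (motif_matches_masking motif mod_pos seq)

-- ===== LEMMAS AND PROOFS =====

-- B's code string carries exactly A's base list, and is bracket-free and nonempty
lemma pv_code_spec (m : Char) (c : String) (h : pvCode m = some c) :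
    pvDegBases m = some c.toList ∧ c.toList ≠ [] ∧ '[' ∉ c.toList ∧ ']' ∉ c.toList := by
  unfold pvCode at h
  split at h <;> first
    | (injection h with h2; subst h2; decide)
    | simp_all

lemma pv_code_isSome (m : Char) (h : pvIsIUPAC m = true) : ∃ c, pvCode m = some c := by
  simp only [pvIsIUPAC, decide_eq_true_eq, List.mem_cons, List.not_mem_nil, or_false] at h
  rcases h with h | h | h | h | h | h | h | h | h | h | h | h | h | h | h <;>
    subst h <;> exact ⟨_, rfl⟩

lemma pv_compile_some (ms : List Char) (h : ms.all pvIsIUPAC = true) :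
    ∃ pat, pvCompile ms = some pat := by
  induction ms with
  | nil => exact ⟨"", rfl⟩
  | cons m ms ih =>
    rw [List.all_cons, Bool.and_eq_true] at h
    obtain ⟨c, hc⟩ := pv_code_isSome m h.1
    obtain ⟨rest, hrest⟩ := ih h.2
    exact ⟨(if c.length == 1 then c else "[" ++ c ++ "]") ++ rest, by simp [pvCompile, hc, hrest]⟩

lemma pv_tw (l r : List Char) (h : ']' ∉ l) :
    (l ++ ']' :: r).takeWhile (fun c => c != ']') = l := by
  induction l with
  | nil => simp [List.takeWhile]
  | cons a l ih =>
    simp only [List.mem_cons, not_or] at h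
    simp [bne_iff_ne, Ne.symm, h.1, ih h.2]

lemma pv_dw (l r : List Char) (h : ']' ∉ l) :
    (l ++ ']' :: r).dropWhile (fun c => c != ']') = ']' :: r := by
  induction l with
  | nil => simp [List.dropWhile]
  | cons a l ih =>
    simp only [List.mem_cons, not_or] at h
    simp only [List.cons_append, List.dropWhile_cons]
    rw [if_pos (by simp [bne_iff_ne]; exact fun hh => h.1 hh.symm)]
    exact ih h.2


-- (if P then x else false) as an && for rewriting
lemma pv_if_and (P : Prop) [Decidable P] (x : Bool) :
    (if P then x else false) = (decide P && x) := by
  by_cases h : P <;> simp [h]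

-- A's per-position loop returns the same verdict as B's fullmatch of the compiled pattern
lemma pv_match_loop (ms : List Char) :
    ∀ (ws : List Char) (pat : String), ws.length = ms.length → pvCompile ms = some pat →
      pvFullmatch pat.toList ws = pvLoopA (ms.zip ws) := by
  induction ms with
  | nil =>
    intro ws pat hlen hc
    have hws : ws = [] := List.length_eq_zero_iff.mp hlen
    injection hc with hc
    subst hc hws
    have h0 : ("" : String).toList = [] := rfl
    rw [h0]
    simp [pvFullmatch, pvLoopA]
  | cons m ms ih =>
    intro ws pat hlen hc
    cases ws with
    | nil => simp at hlen
    | cons t ts =>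
      unfold pvCompile at hc
      cases hcode : pvCode m with
      | none => rw [hcode] at hc; cases hc
      | some c =>
        rw [hcode] at hc
        cases hrest : pvCompile ms with
        | none => rw [hrest] at hc; cases hc
        | some rest =>
          rw [hrest] at hc
          injection hc with hc
          subst hc
          obtain ⟨hdeg, hne, hlb, hrb⟩ := pv_code_spec m c hcode
          have hlen' : ts.length = ms.length := by simpa using hlen
          have ihr := ih ts rest hlen' hrest
          simp only [List.zip_cons_cons, pvLoopA, hdeg]
          rw [pv_if_and]
          by_cases hsing : c.length == 1
          · -- singleton code: a literal character in the pattern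
            obtain ⟨c0, hc0⟩ : ∃ c0, c.toList = [c0] := by
              apply List.length_eq_one_iff.mp
              have h1 : c.length = 1 := by simpa using hsing
              simpa [← String.length_toList] using h1
            have hc0ne : c0 ≠ '[' := by
              intro hEq; exact hlb (by simp [hc0, hEq])
            rw [if_pos hsing, String.toList_append, hc0]
            simp only [List.cons_append, List.nil_append, pvFullmatch, if_neg hc0ne]
            have hbe : (c0 == t) = decide (t ∈ c.toList) := by
              by_cases h : c0 = t
              · simp [hc0, h]
              · simp [hc0, h, Ne.symm h]
            rw [hbe, ihr, hc0]
          · -- multi-base code: a [..] character class in the pattern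
            rw [if_neg hsing, String.toList_append, String.toList_append,
              String.toList_append]
            have h1 : ("[" : String).toList = ['['] := rfl
            have h2 : ("]" : String).toList = [']'] := rfl
            rw [h1, h2]
            simp only [List.cons_append, List.append_assoc,
              List.nil_append, pvFullmatch, if_true]
            rw [pv_tw _ _ hrb, pv_dw _ _ hrb]
            simp only [List.drop_succ_cons, List.drop_zero]
            rw [ihr]

theorem motif_matches_masking_spec : Claim_equal_motif_matches_masking := by
  intro motif mod_pos seq _hDom hPre
  unfold Spec_motif_matches_masking motif_matches_masking motif_matches_masking_alt
  simp only []
  set L : Int := PySem.Str.len seq with hL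
  set K : Int := PySem.Str.len motif with hK
  set st : Int := PySem.Int.floordiv L 2 - mod_pos with hst
  by_cases hg : st < 0 ∨ st + K > L
  · simp [hg]
  · simp only [hg, if_false]
    push Not at hg
    obtain ⟨hst0, hend⟩ := hg
    have hLlen : L = (seq.toList.length : Int) := by simp [hL, PySem.Str.len]
    have hKlen : K = (motif.toList.length : Int) := by simp [hK, PySem.Str.len]
    have hval : motif.toList.all pvIsIUPAC = true := by
      rcases hPre with h | h
      · exfalso; rw [← hst, ← hK, ← hL] at h; omega
      · exact h
    obtain ⟨pat, hpat⟩ := pv_compile_some motif.toList hval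
    rw [hpat]
    have hwin : PySem.List.slice seq.toList (some st) (some (st + K)) =
        (seq.toList.drop st.toNat).take motif.toList.length := by
      rw [PySem.List.slice_toNat _ hst0 (by omega)]
      congr 1
      omega
    rw [hwin]
    have hwlen : ((seq.toList.drop st.toNat).take motif.toList.length).length
        = motif.toList.length := by
      simp only [List.length_take, List.length_drop]
      omega
    exact (pv_match_loop motif.toList _ pat hwlen hpat).symm
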